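-- pv_equiv track=rewrite | github.com/lucamattiazzi/aoc-2024 | day12/p2b.py | compute_sides
-- ===== SOURCE A (Python) =====
-- from collections import Counter
--
-- def compute_sides(group):
--     all_vertices = []
--     for point in group:
--         all_vertices.append((point[0] + 1, point[1]))
--         all_vertices.append((point[0] - 1, point[1]))
--         all_vertices.append((point[0], point[1] + 1))
--         all_vertices.append((point[0], point[1] - 1))
--     counter = Counter(all_vertices)
--     vertices = len([k for k, v in counter.items() if v == 1])
--     return vertices
-- ===== SOURCE B (Python) =====
-- def compute_sides(group):
--     seen_once = set()
--     seen_more = set()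
--     for x, y in group:
--         for v in ((x + 1, y), (x - 1, y), (x, y + 1), (x, y - 1)):
--             if v in seen_once:
--                 seen_once.discard(v)
--                 seen_more.add(v)
--             elif v not in seen_more:
--                 seen_once.add(v)
--     return len(seen_once)
-- ===== Notes on version B (the rewrite author's own statement) =====
-- stated objective: simpler
-- what changed: Single pass over each point's four neighbor offsets maintaining two membership sets (seen-once / seen-again) instead of materialising the full neighbor list and a Counter; returns the size of the seen-once set.
import Mathlib
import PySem

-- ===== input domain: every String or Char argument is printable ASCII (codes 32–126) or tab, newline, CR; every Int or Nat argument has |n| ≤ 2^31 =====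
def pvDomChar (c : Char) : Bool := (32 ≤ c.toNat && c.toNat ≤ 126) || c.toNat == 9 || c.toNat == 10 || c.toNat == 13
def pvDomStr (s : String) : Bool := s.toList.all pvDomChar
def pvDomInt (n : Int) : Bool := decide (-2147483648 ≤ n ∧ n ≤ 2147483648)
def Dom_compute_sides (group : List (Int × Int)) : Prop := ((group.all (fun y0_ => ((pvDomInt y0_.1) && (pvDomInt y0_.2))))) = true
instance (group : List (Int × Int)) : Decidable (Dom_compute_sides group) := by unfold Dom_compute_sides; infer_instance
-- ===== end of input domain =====

-- B replaces A's full neighbor list + Counter with a single pass keeping two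
-- membership sets (seen-once / seen-again); objective: simpler state, same cost.


-- ===== PORT A =====
def compute_sides (group : List (Int × Int)) : Int :=
  -- all_vertices built by four appends per point, as in A
  let all_vertices : List (Int × Int) :=
    group.foldl (fun acc point =>
      ((((acc ++ [(point.1 + 1, point.2)]) ++ [(point.1 - 1, point.2)])
          ++ [(point.1, point.2 + 1)]) ++ [(point.1, point.2 - 1)])) []
  let counter := PySem.Dict.counter all_vertices
  let vertices := (counter.items.filter (fun kv => kv.2 == (1 : Int))).length
  (vertices : Int)

-- ===== PORT B =====
-- the body of B's inner loop: one neighbor vertex against the two sets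
def csStep (s : PySem.Set (Int × Int) × PySem.Set (Int × Int)) (v : Int × Int) :
    PySem.Set (Int × Int) × PySem.Set (Int × Int) :=
  if PySem.Set.contains s.1 v then (PySem.Set.discard s.1 v, PySem.Set.add s.2 v)
  else if PySem.Set.contains s.2 v then s
  else (PySem.Set.add s.1 v, s.2)

def compute_sides_alt (group : List (Int × Int)) : Int :=
  let s :=
    group.foldl (fun s p =>
      [(p.1 + 1, p.2), (p.1 - 1, p.2), (p.1, p.2 + 1), (p.1, p.2 - 1)].foldl csStep s)
      (PySem.Set.empty, PySem.Set.empty)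
  (PySem.Set.len s.1 : Int)

-- ===== PRECONDITION & SPEC =====
def Spec_compute_sides (group : List (Int × Int)) (out : Int) : Prop := out = compute_sides_alt group
instance (group : List (Int × Int)) (out : Int) : Decidable (Spec_compute_sides group out) := by unfold Spec_compute_sides; infer_instance

-- ===== CLAIM (what is proved, stated in full; the proofs are below) =====
def Claim_equal_compute_sides : Prop := ∀ (group : List (Int × Int)), Dom_compute_sides group → Spec_compute_sides group (compute_sides group)

-- ===== LEMMAS AND PROOFS =====

-- the stream of neighbor vertices, in the order both programs visit them
def nbrs (p : Int × Int) : List (Int × Int) :=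
  [(p.1 + 1, p.2), (p.1 - 1, p.2), (p.1, p.2 + 1), (p.1, p.2 - 1)]

-- invariant of B's fold over the vertex stream: the first set is exactly the
-- count-1 vertices (in first-occurrence order), the second holds the count-≥2 ones
theorem csStep_invariant (vs : List (Int × Int)) :
    (vs.foldl csStep (PySem.Set.empty, PySem.Set.empty)).1
      = (PySem.Set.ofList vs).filter (fun k => vs.count k == 1)
    ∧ ∀ k, k ∈ (vs.foldl csStep (PySem.Set.empty, PySem.Set.empty)).2 ↔ 2 ≤ vs.count k := by
  induction vs using List.reverseRecOn with
  | nil => exact ⟨rfl, by simp [PySem.Set.empty]⟩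
  | append_singleton xs v ih =>
    obtain ⟨h1, h2⟩ := ih
    have hfoldl : (xs ++ [v]).foldl csStep (PySem.Set.empty, PySem.Set.empty)
        = csStep (xs.foldl csStep (PySem.Set.empty, PySem.Set.empty)) v := by
      rw [List.foldl_append]; rfl
    rw [hfoldl]
    set st := xs.foldl csStep (PySem.Set.empty, PySem.Set.empty) with hst
    have hmem1 : v ∈ st.1 ↔ xs.count v = 1 := by
      rw [h1]
      simp only [List.mem_filter, PySem.Set.mem_ofList, beq_iff_eq]
      constructor
      · rintro ⟨_, h⟩; exact h
      · intro h; exact ⟨List.count_pos_iff.mp (by omega), h⟩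
    have hmem2 : v ∈ st.2 ↔ 2 ≤ xs.count v := h2 v
    by_cases hc1 : v ∈ st.1
    · -- v was seen exactly once before: move it to the seen-again set
      have hcnt : xs.count v = 1 := hmem1.mp hc1
      have hvin : v ∈ xs := List.count_pos_iff.mp (by omega)
      rw [show csStep st v = (PySem.Set.discard st.1 v, PySem.Set.add st.2 v) by
        simp [csStep, hc1]]
      constructor
      · show PySem.Set.discard st.1 v = _
        rw [PySem.Set.ofList_append_singleton,
          PySem.Set.add_of_mem ((PySem.Set.mem_ofList xs v).mpr hvin), h1]
        simp only [PySem.Set.discard, List.filter_filter]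
        apply List.filter_congr
        intro k hk
        by_cases hkv : k = v
        · subst hkv; simp [List.count_append, hcnt]
        · have hvk : ¬ v = k := fun h => hkv h.symm
          simp [List.count_append, hkv, hvk]
      · intro k
        rw [PySem.Set.mem_add, h2 k]
        by_cases hkv : k = v
        · subst hkv; simp [List.count_append, hcnt]
        · have hvk : ¬ v = k := fun h => hkv h.symm
          simp [List.count_append, hkv, hvk]
    · by_cases hc2 : v ∈ st.2
      · -- v already seen at least twice: nothing changes
        have hcnt : 2 ≤ xs.count v := hmem2.mp hc2
        have hvin : v ∈ xs := List.count_pos_iff.mp (by omega)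
        rw [show csStep st v = st by simp [csStep, hc1, hc2]]
        constructor
        · rw [PySem.Set.ofList_append_singleton,
            PySem.Set.add_of_mem ((PySem.Set.mem_ofList xs v).mpr hvin), h1]
          apply List.filter_congr
          intro k hk
          by_cases hkv : k = v
          · subst hkv
            simp only [List.count_append, List.count_singleton]
            rw [if_pos (by simp)]
            have c1 : (List.count k xs == 1) = false := by simp; omega
            have c2 : (List.count k xs + 1 == 1) = false := by simp; omega
            rw [c1, c2]
          · have hvk : ¬ v = k := fun h => hkv h.symm
            simp [List.count_append, hvk]
        · intro k
          rw [h2 k]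
          by_cases hkv : k = v
          · subst hkv
            simp only [List.count_append, List.count_singleton]
            rw [if_pos (by simp)]
            omega
          · have hvk : ¬ v = k := fun h => hkv h.symm
            simp [List.count_append, hvk]
      · -- v is new: it joins the seen-once set
        have hcnt : xs.count v = 0 := by
          have n1 : ¬ xs.count v = 1 := fun h => hc1 (hmem1.mpr h)
          have n2 : ¬ 2 ≤ xs.count v := fun h => hc2 (hmem2.mpr h)
          omega
        have hvout : v ∉ xs := by
          intro h; exact absurd (List.count_pos_iff.mpr h) (by omega)
        rw [show csStep st v = (PySem.Set.add st.1 v, st.2) by simp [csStep, hc1, hc2]]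
        constructor
        · show PySem.Set.add st.1 v = _
          have hv1 : v ∉ PySem.Set.ofList xs := fun h =>
            hvout ((PySem.Set.mem_ofList xs v).mp h)
          rw [PySem.Set.ofList_append_singleton, PySem.Set.add_of_not_mem hv1,
            List.filter_append, PySem.Set.add_of_not_mem hc1, h1]
          congr 1
          · apply List.filter_congr
            intro k hk
            have hkv : k ≠ v := fun h => hv1 (h ▸ hk)
            have hvk : ¬ v = k := fun h => hkv h.symm
            simp [List.count_append, hvk]
          · simp [List.count_append, hcnt]
        · intro k
          rw [h2 k]
          by_cases hkv : k = v
          · subst hkv; simp [List.count_append, hcnt]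
          · have hvk : ¬ v = k := fun h => hkv h.symm
            simp [List.count_append, hvk]

theorem compute_sides_spec' (group : List (Int × Int)) :
    compute_sides group = compute_sides_alt group := by
  have hA : group.foldl (fun acc point =>
      ((((acc ++ [(point.1 + 1, point.2)]) ++ [(point.1 - 1, point.2)])
          ++ [(point.1, point.2 + 1)]) ++ [(point.1, point.2 - 1)])) []
      = group.flatMap nbrs := by
    have hf : (fun (acc : List (Int × Int)) point =>
        ((((acc ++ [(point.1 + 1, point.2)]) ++ [(point.1 - 1, point.2)])
            ++ [(point.1, point.2 + 1)]) ++ [(point.1, point.2 - 1)]))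
        = (fun acc x => acc ++ nbrs x) := by
      funext acc p; simp [nbrs]
    rw [hf, PySem.List.foldl_append_eq_flatMap]; rfl
  have hB : group.foldl (fun s p =>
      [(p.1 + 1, p.2), (p.1 - 1, p.2), (p.1, p.2 + 1), (p.1, p.2 - 1)].foldl csStep s)
      (PySem.Set.empty, PySem.Set.empty)
      = (group.flatMap nbrs).foldl csStep (PySem.Set.empty, PySem.Set.empty) := by
    rw [List.foldl_flatMap]; rfl
  obtain ⟨hinv, -⟩ := csStep_invariant (group.flatMap nbrs)
  show (((PySem.Dict.counter _).items.filter (fun kv => kv.2 == (1 : Int))).length : Int) = _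
  rw [hA, PySem.Dict.items_counter, List.filter_map, List.length_map]
  show _ = PySem.Set.len (group.foldl _ (PySem.Set.empty, PySem.Set.empty)).1
  rw [hB]
  show _ = (((group.flatMap nbrs).foldl csStep (PySem.Set.empty, PySem.Set.empty)).1.length : Int)
  rw [hinv]
  congr 1
  apply congrArg
  apply List.filter_congr
  intro k hk
  simp [Function.comp]

-- ===== VERDICT (by name: the statement is the Claim_ definition above) =====
theorem compute_sides_spec : Claim_equal_compute_sides := by
  intro group _
  unfold Spec_compute_sides
  exact compute_sides_spec' group
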